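-- pv_equiv track=rewrite | github.com/demoncoder-crypto/Flickd | models/product_matcher.py | _are_similar_colors
-- ===== SOURCE A (Python) =====
-- def _are_similar_colors(color1: str, color2: str) -> bool:
--     """Check if two colors are similar"""
--     similar_color_groups = [
--         ['black', 'dark', 'charcoal'],
--         ['white', 'cream', 'ivory', 'beige'],
--         ['red', 'crimson', 'burgundy'],
--         ['blue', 'navy', 'royal'],
--         ['green', 'forest', 'olive'],
--         ['pink', 'rose', 'blush'],
--         ['brown', 'tan', 'camel'],
--         ['gray', 'grey', 'silver']
--     ]
--
--     for group in similar_color_groups: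
--         if color1 in group and color2 in group:
--             return True
--     return False
-- ===== SOURCE B (Python) =====
-- def _are_similar_colors(color1: str, color2: str) -> bool:
--     """Check if two colors are similar"""
--     similar_color_groups = [
--         ['black', 'dark', 'charcoal'],
--         ['white', 'cream', 'ivory', 'beige'],
--         ['red', 'crimson', 'burgundy'],
--         ['blue', 'navy', 'royal'],
--         ['green', 'forest', 'olive'],
--         ['pink', 'rose', 'blush'],
--         ['brown', 'tan', 'camel'],
--         ['gray', 'grey', 'silver']
--     ]
--     color_to_group = {c: i for i, g in enumerate(similar_color_groups) for c in g}
--     return (color1 in color_to_group and color2 in color_to_group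
--             and color_to_group[color1] == color_to_group[color2])
-- ===== Notes on version B (the rewrite author's own statement) =====
-- stated objective: idiomatic
-- what changed: Builds a flat color->group-index dictionary once and answers with two direct lookups and an index equality, instead of scanning every group and testing both colors' membership in each.
import Mathlib
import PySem

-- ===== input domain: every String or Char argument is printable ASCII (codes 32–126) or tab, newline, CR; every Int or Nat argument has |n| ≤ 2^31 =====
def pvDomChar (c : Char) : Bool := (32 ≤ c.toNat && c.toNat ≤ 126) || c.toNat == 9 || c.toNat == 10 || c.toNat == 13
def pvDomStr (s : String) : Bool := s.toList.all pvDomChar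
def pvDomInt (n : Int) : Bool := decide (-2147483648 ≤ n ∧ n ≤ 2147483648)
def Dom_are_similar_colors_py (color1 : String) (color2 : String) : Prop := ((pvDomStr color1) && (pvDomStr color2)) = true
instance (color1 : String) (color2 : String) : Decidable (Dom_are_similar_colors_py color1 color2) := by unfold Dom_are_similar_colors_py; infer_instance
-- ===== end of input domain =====

-- B replaces A's query-time scan over the groups (testing both colors' membership in each)
-- by a flat color→group-index dictionary built once, answered with two lookups and an index equality.

-- ===== PORT A =====
-- the literal table shared by both Pythons
def pvGroups : List (List String) :=
  [["black", "dark", "charcoal"],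
   ["white", "cream", "ivory", "beige"],
   ["red", "crimson", "burgundy"],
   ["blue", "navy", "royal"],
   ["green", "forest", "olive"],
   ["pink", "rose", "blush"],
   ["brown", "tan", "camel"],
   ["gray", "grey", "silver"]]

-- 'for group in …: if color1 in group and color2 in group: return True / return False'
def pvLoopA (color1 color2 : String) : List (List String) → Bool
  | [] => false
  | g :: rest => if g.contains color1 && g.contains color2 then true else pvLoopA color1 color2 rest

def are_similar_colors_py (color1 : String) (color2 : String) : Bool :=
  pvLoopA color1 color2 pvGroups

-- ===== PORT B =====
-- color_to_group = {c: i for i, g in enumerate(similar_color_groups) for c in g}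
def pvColorToGroup : PySem.Dict String Int :=
  (PySem.List.enumerate pvGroups).foldl
    (fun d ig => ig.2.foldl (fun d c => d.insert c ig.1) d) ∅

-- color1 in d and color2 in d and d[color1] == d[color2]
def are_similar_colors_py_alt (color1 : String) (color2 : String) : Bool :=
  match pvColorToGroup.get? color1, pvColorToGroup.get? color2 with
  | some i, some j => i == j
  | _, _ => false

-- ===== PRECONDITION & SPEC =====
def Spec_are_similar_colors_py (color1 : String) (color2 : String) (out : Bool) : Prop := out = are_similar_colors_py_alt color1 color2
instance (color1 : String) (color2 : String) (out : Bool) : Decidable (Spec_are_similar_colors_py color1 color2 out) := by unfold Spec_are_similar_colors_py; infer_instance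

-- ===== CLAIM (what is proved, stated in full; the proofs are below) =====
def Claim_equal_are_similar_colors_py : Prop := ∀ (color1 : String) (color2 : String), Dom_are_similar_colors_py color1 color2 → Spec_are_similar_colors_py color1 color2 (are_similar_colors_py color1 color2)

-- ===== LEMMAS AND PROOFS =====

-- all 26 colors appearing in the table, flattened
def pvAllColors : List String :=
  ["black", "dark", "charcoal", "white", "cream", "ivory", "beige",
   "red", "crimson", "burgundy", "blue", "navy", "royal",
   "green", "forest", "olive", "pink", "rose", "blush",
   "brown", "tan", "camel", "gray", "grey", "silver"]

-- the comprehension-built dictionary, evaluated: the flattened (color, group-index) pairs in order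
theorem pvColorToGroup_items : pvColorToGroup =
    ⟨[("black", 0), ("dark", 0), ("charcoal", 0), ("white", 1), ("cream", 1), ("ivory", 1),
      ("beige", 1), ("red", 2), ("crimson", 2), ("burgundy", 2), ("blue", 3), ("navy", 3),
      ("royal", 3), ("green", 4), ("forest", 4), ("olive", 4), ("pink", 5), ("rose", 5),
      ("blush", 5), ("brown", 6), ("tan", 6), ("camel", 6), ("gray", 7), ("grey", 7),
      ("silver", 7)]⟩ := by decide

-- a color outside the table is found by neither program's membership machinery
theorem pv_out_get (c : String) (h : c ∉ pvAllColors) : pvColorToGroup.get? c = none := by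
  simp only [pvAllColors, List.mem_cons, not_or] at h
  obtain ⟨h1,h2,h3,h4,h5,h6,h7,h8,h9,h10,h11,h12,h13,h14,h15,h16,h17,h18,h19,h20,h21,h22,h23,h24,h25,-⟩ := h
  rw [pvColorToGroup_items]
  simp [PySem.Dict.get?, Ne.symm h1, Ne.symm h2, Ne.symm h3, Ne.symm h4, Ne.symm h5, Ne.symm h6,
    Ne.symm h7, Ne.symm h8, Ne.symm h9, Ne.symm h10, Ne.symm h11, Ne.symm h12, Ne.symm h13,
    Ne.symm h14, Ne.symm h15, Ne.symm h16, Ne.symm h17, Ne.symm h18, Ne.symm h19, Ne.symm h20,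
    Ne.symm h21, Ne.symm h22, Ne.symm h23, Ne.symm h24, Ne.symm h25]

theorem pv_out_loop (c c2 : String) (h : c ∉ pvAllColors) :
    pvLoopA c c2 pvGroups = false := by
  simp only [pvAllColors, List.mem_cons, not_or] at h
  obtain ⟨h1,h2,h3,h4,h5,h6,h7,h8,h9,h10,h11,h12,h13,h14,h15,h16,h17,h18,h19,h20,h21,h22,h23,h24,h25,-⟩ := h
  simp [pvGroups, pvLoopA, h1, h2, h3, h4, h5, h6, h7, h8, h9, h10, h11, h12, h13,
    h14, h15, h16, h17, h18, h19, h20, h21, h22, h23, h24, h25]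

theorem pv_out_loop_right (c1 c : String) (h : c ∉ pvAllColors) :
    pvLoopA c1 c pvGroups = false := by
  simp only [pvAllColors, List.mem_cons, not_or] at h
  obtain ⟨h1,h2,h3,h4,h5,h6,h7,h8,h9,h10,h11,h12,h13,h14,h15,h16,h17,h18,h19,h20,h21,h22,h23,h24,h25,-⟩ := h
  simp [pvGroups, pvLoopA, h1, h2, h3, h4, h5, h6, h7, h8, h9, h10, h11, h12, h13,
    h14, h15, h16, h17, h18, h19, h20, h21, h22, h23, h24, h25]

-- ===== VERDICT (by name: the statement is the Claim_ definition above) =====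
theorem are_similar_colors_py_spec : Claim_equal_are_similar_colors_py := by
  intro color1 color2 _
  show are_similar_colors_py color1 color2 = are_similar_colors_py_alt color1 color2
  by_cases h1 : color1 ∈ pvAllColors
  · by_cases h2 : color2 ∈ pvAllColors
    · fin_cases h1 <;> fin_cases h2 <;> decide
    · unfold are_similar_colors_py are_similar_colors_py_alt
      rw [pv_out_loop_right color1 color2 h2, pv_out_get color2 h2]
      cases pvColorToGroup.get? color1 <;> rfl
  · unfold are_similar_colors_py are_similar_colors_py_alt
    rw [pv_out_loop color1 color2 h1, pv_out_get color1 h1]
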